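-- pv_equiv track=rewrite | github.com/dhrvjha/AI_Lab_Report | Lab solutions/week3/submission/3sat.py | bsrch
-- ===== SOURCE A (Python) =====
-- def evlfml(fml, asn):
--     return sum(any(asn[v] for v in c) for c in fml)
--
-- def bsrch(fml, asn, bw, sc):
--     if evlfml(fml, asn) == len(fml):
--         return asn, f"{sc}/{sc}"
--     cands = []
--     for k, v in asn.items():
--         sc += 1
--         na = asn.copy()
--         na[k] = 1 - v
--         s = evlfml(fml, na)
--         cands.append((na, s, sc))
--     best = sorted(cands, key=lambda x: x[1])[-bw:]
--     if len(fml) in [c[1] for c in best]: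
--         sol = next(c for c in best if c[1] == len(fml))
--         return sol[0], f"{sol[2]}/{sc}"
--     return bsrch(fml, best[-1][0], bw, sc)
-- ===== SOURCE B (Python) =====
-- def evlfml(fml, asn):
--     cnt = 0
--     for c in fml:
--         for v in c:
--             if asn[v]:
--                 cnt += 1
--                 break
--     return cnt
--
-- def bsrch(fml, asn, bw, sc):
--     n = len(fml)
--     while True:
--         if evlfml(fml, asn) == n:
--             return asn, f"{sc}/{sc}"
--         cands = []
--         for k, v in asn.items():
--             sc += 1
--             na = dict(asn)
--             na[k] = 1 - v
--             cands.append((na, evlfml(fml, na), sc))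
--         best = sorted(cands, key=lambda x: x[1])[-bw:]
--         for c in best:
--             if c[1] == n:
--                 return c[0], f"{c[2]}/{sc}"
--         asn = best[-1][0]
-- ===== Notes on version B (the rewrite author's own statement) =====
-- stated objective: alternative
-- what changed: bsrch's tail recursion becomes an iterative while-True loop holding asn/sc as local state, the membership-test-plus-next double scan of best becomes a single first-match scan with early return, and evlfml's sum/any generator expressions become explicit counting loops with break.
import Mathlib
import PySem

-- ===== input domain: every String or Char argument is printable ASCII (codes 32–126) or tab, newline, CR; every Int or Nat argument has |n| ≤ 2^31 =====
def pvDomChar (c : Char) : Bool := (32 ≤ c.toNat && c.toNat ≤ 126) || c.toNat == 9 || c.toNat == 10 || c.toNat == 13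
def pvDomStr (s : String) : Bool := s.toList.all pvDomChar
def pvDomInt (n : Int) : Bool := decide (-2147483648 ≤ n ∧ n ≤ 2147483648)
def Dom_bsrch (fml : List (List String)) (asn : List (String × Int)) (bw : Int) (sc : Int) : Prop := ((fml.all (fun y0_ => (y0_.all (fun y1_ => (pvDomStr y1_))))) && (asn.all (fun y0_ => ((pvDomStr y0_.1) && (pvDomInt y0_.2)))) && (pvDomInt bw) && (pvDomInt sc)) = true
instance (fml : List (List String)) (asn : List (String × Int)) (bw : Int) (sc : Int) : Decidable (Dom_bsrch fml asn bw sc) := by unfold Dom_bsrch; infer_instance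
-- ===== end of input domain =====

-- B changes only the decomposition (iterative loop, single first-match scan, explicit counting loops);
-- return-value equivalence is claimed on Pre_bsrch (the inputs on which A raises no exception).

-- ===== PORT A =====
-- evlfml: sum(any(asn[v] for v in c) for c in fml); asn[v] on a missing key is a KeyError,
-- excluded by Pre_bsrch (there getD's default is never the value used).
def evlA (fml : List (List String)) (asn : PySem.Dict String Int) : Int :=
  fml.foldl (fun acc c => acc + (if c.any (fun v => asn.getD v 0 != 0) then 1 else 0)) 0

-- A's recursion, made total with a fuel counter; Pre_bsrch guarantees the Python recursion depth
-- is at most fml.length + 1, so fuel fml.length + 2 is a pure totality guard (never exhausted on Pre_).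
def bsrchA (fuel : Nat) (fml : List (List String)) (asn : PySem.Dict String Int) (bw sc : Int) :
    (List (String × Int)) × String :=
  match fuel with
  | 0 => (asn.items, "")
  | fuel + 1 =>
    if evlA fml asn = (fml.length : Int) then
      (asn.items, PySem.Int.toStr sc ++ "/" ++ PySem.Int.toStr sc)
    else
      let st := asn.items.foldl
        (fun (st : List (PySem.Dict String Int × Int × Int) × Int) kv =>
          let sc1 := st.2 + 1
          let na := asn.insert kv.1 (1 - kv.2)
          (st.1 ++ [(na, evlA fml na, sc1)], sc1)) ([], sc)
      let best := PySem.List.slice (PySem.List.sorted st.1 (fun x => x.2.1) false) (some (-bw)) none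
      if (fml.length : Int) ∈ best.map (fun c => c.2.1) then
        match best.find? (fun c => c.2.1 == (fml.length : Int)) with
        | some sol => (sol.1.items, PySem.Int.toStr sol.2.2 ++ "/" ++ PySem.Int.toStr st.2)
        | none => (asn.items, "")   -- unreachable: Python's next() is guarded by the membership test
      else
        bsrchA fuel fml (PySem.List.pyGetD best (-1) (PySem.Dict.mk [], 0, 0)).1 bw st.2

def bsrch (fml : List (List String)) (asn : List (String × Int)) (bw : Int) (sc : Int) : (List (String × Int)) × String :=
  bsrchA (fml.length + 2) fml (PySem.Dict.mk asn) bw sc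

-- ===== PORT B =====
-- evlfml of B: explicit counting loop with break
def clauseB (asn : PySem.Dict String Int) : List String → Bool
  | [] => false
  | v :: rest => if asn.getD v 0 != 0 then true else clauseB asn rest

def evlB (fml : List (List String)) (asn : PySem.Dict String Int) : Int :=
  match fml with
  | [] => 0
  | c :: rest => (if clauseB asn c then 1 else 0) + evlB rest asn

-- the cands-building for-loop of B (sc threaded through)
def candsB (fml : List (List String)) (asn : PySem.Dict String Int) (sc : Int) :
    List (String × Int) → List (PySem.Dict String Int × Int × Int)
  | [] => []
  | (k, v) :: rest =>
    let na := asn.insert k (1 - v)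
    (na, evlB fml na, sc + 1) :: candsB fml asn (sc + 1) rest

-- the early-return scan 'for c in best: if c[1] == n: return …'
def findSolB (n : Int) : List (PySem.Dict String Int × Int × Int) → Option (PySem.Dict String Int × Int × Int)
  | [] => none
  | c :: rest => if c.2.1 = n then some c else findSolB n rest

-- the while-True loop of B, made total with the same pure fuel guard
def loopB (fuel : Nat) (fml : List (List String)) (n : Int) (asn : PySem.Dict String Int) (bw sc : Int) :
    (List (String × Int)) × String :=
  match fuel with
  | 0 => (asn.items, "")
  | fuel + 1 =>
    if evlB fml asn = n then (asn.items, PySem.Int.toStr sc ++ "/" ++ PySem.Int.toStr sc)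
    else
      let cands := candsB fml asn sc asn.items
      let sc' := sc + (asn.items.length : Int)
      let best := PySem.List.slice (PySem.List.sorted cands (fun x => x.2.1) false) (some (-bw)) none
      match findSolB n best with
      | some c => (c.1.items, PySem.Int.toStr c.2.2 ++ "/" ++ PySem.Int.toStr sc')
      | none => loopB fuel fml n (PySem.List.pyGetD best (-1) (PySem.Dict.mk [], 0, 0)).1 bw sc'

def bsrch_alt (fml : List (List String)) (asn : List (String × Int)) (bw : Int) (sc : Int) : (List (String × Int)) × String :=
  loopB (fml.length + 2) fml (fml.length : Int) (PySem.Dict.mk asn) bw sc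

-- ===== PRECONDITION & SPEC =====
-- Pre_bsrch excludes exactly the inputs on which A raises, plus two corners it over-approximates:
-- A raises KeyError when evaluating a clause reaches a variable missing from asn, IndexError when
-- asn or the beam slice is empty at a recursive step, and RecursionError when the search cycles
-- (possible only with an empty clause or a clause variable missing from asn: otherwise the best-flip
-- score strictly increases each step, so the recursion depth is at most fml.length + 1).  The
-- over-approximation: assignments with duplicate keys (a dict input cannot produce them; the
-- collapse order is a convention corner) and inputs with a missing clause variable that every
-- evaluation happens to short-circuit past, on which A still returns — see the cited example.
def Pre_bsrch (fml : List (List String)) (asn : List (String × Int)) (bw : Int) (sc : Int) : Prop :=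
  (asn.map Prod.fst).Nodup ∧
  ( (∀ c ∈ fml, ((c.find? (fun v => asn.lookup v != some (0 : Int))).any
        (fun v => ((asn.lookup v).getD 0) != 0)) = true) ∨
    ( (∀ c ∈ fml, c ≠ [] ∧ ∀ v ∈ c, v ∈ asn.map Prod.fst) ∧ asn ≠ [] ∧
      (1 ≤ bw ∨ -bw < (asn.length : Int)) ) )

instance (fml : List (List String)) (asn : List (String × Int)) (bw : Int) (sc : Int) : Decidable (Pre_bsrch fml asn bw sc) := by unfold Pre_bsrch; infer_instance

def pvWitness_bsrch : List (List String) × (List (String × Int)) × Int × Int := ([["a"], ["b"]], [("a", 0), ("b", 0)], 1, 0)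

def Spec_bsrch (fml : List (List String)) (asn : List (String × Int)) (bw : Int) (sc : Int) (out : (List (String × Int)) × String) : Prop := out = bsrch_alt fml asn bw sc
instance (fml : List (List String)) (asn : List (String × Int)) (bw : Int) (sc : Int) (out : (List (String × Int)) × String) : Decidable (Spec_bsrch fml asn bw sc out) := by unfold Spec_bsrch; infer_instance

-- ===== CLAIM (what is proved, stated in full; the proofs are below) =====
def Claim_equal_bsrch : Prop := ∀ (fml : List (List String)) (asn : List (String × Int)) (bw : Int) (sc : Int), Dom_bsrch fml asn bw sc → Pre_bsrch fml asn bw sc → Spec_bsrch fml asn bw sc (bsrch fml asn bw sc)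

-- ===== LEMMAS AND PROOFS =====

theorem clauseB_eq_any (asn : PySem.Dict String Int) (c : List String) :
    clauseB asn c = c.any (fun v => asn.getD v 0 != 0) := by
  induction c with
  | nil => rfl
  | cons v rest ih => simp only [clauseB, List.any_cons, bne, ih]; split_ifs with h <;> simp [h]

theorem evlA_foldl (fml : List (List String)) (asn : PySem.Dict String Int) (acc : Int) :
    fml.foldl (fun acc c => acc + (if c.any (fun v => asn.getD v 0 != 0) then 1 else 0)) acc
      = acc + evlB fml asn := by
  induction fml generalizing acc with
  | nil => simp [evlB]
  | cons c rest ih => simp only [List.foldl_cons, evlB, clauseB_eq_any]; rw [ih]; ring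

theorem evlB_eq_evlA (fml : List (List String)) (asn : PySem.Dict String Int) :
    evlB fml asn = evlA fml asn := by
  rw [evlA, evlA_foldl]; ring

theorem candsA_eq_candsB (fml : List (List String)) (asn : PySem.Dict String Int)
    (l : List (String × Int)) (acc : List (PySem.Dict String Int × Int × Int)) (sc : Int) :
    l.foldl (fun (st : List (PySem.Dict String Int × Int × Int) × Int) kv =>
        let sc1 := st.2 + 1
        let na := asn.insert kv.1 (1 - kv.2)
        (st.1 ++ [(na, evlA fml na, sc1)], sc1)) (acc, sc)
      = (acc ++ candsB fml asn sc l, sc + (l.length : Int)) := by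
  induction l generalizing acc sc with
  | nil => simp [candsB]
  | cons kv rest ih =>
    obtain ⟨k, v⟩ := kv
    simp only [List.foldl_cons, candsB, ih, evlB_eq_evlA, List.length_cons]
    refine Prod.ext ?_ ?_
    · simp
    · simp only; push_cast; ring

theorem findSolB_eq_find? (n : Int) (l : List (PySem.Dict String Int × Int × Int)) :
    findSolB n l = l.find? (fun c => c.2.1 == n) := by
  induction l with
  | nil => rfl
  | cons c rest ih =>
    simp only [findSolB, List.find?_cons]
    by_cases h : c.2.1 = n
    · have hb : (c.2.1 == n) = true := by simp [h]
      rw [hb]; simp [h]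
    · have hb : (c.2.1 == n) = false := by simp [h]
      rw [hb]; simp [h, ih]

theorem mem_map_iff_find? (n : Int) (l : List (PySem.Dict String Int × Int × Int)) :
    (n ∈ l.map (fun c => c.2.1)) ↔ (l.find? (fun c => c.2.1 == n)).isSome := by
  rw [List.find?_isSome, List.mem_map]
  constructor
  · rintro ⟨c, hc, he⟩; exact ⟨c, hc, by simp [he]⟩
  · rintro ⟨c, hc, he⟩; exact ⟨c, hc, by simpa using he⟩

-- the single step-by-step equivalence: for EQUAL fuel the two ports agree on every input
theorem bsrchA_eq_loopB (fuel : Nat) (fml : List (List String)) (asn : PySem.Dict String Int)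
    (bw sc : Int) :
    bsrchA fuel fml asn bw sc = loopB fuel fml (fml.length : Int) asn bw sc := by
  induction fuel generalizing asn sc with
  | zero => rfl
  | succ fuel ih =>
    rw [bsrchA, loopB, evlB_eq_evlA]
    by_cases hsat : evlA fml asn = (fml.length : Int)
    · rw [if_pos hsat, if_pos hsat]
    · rw [if_neg hsat, if_neg hsat]
      simp only [candsA_eq_candsB fml asn asn.items [] sc, List.nil_append, findSolB_eq_find?]
      cases hf : (PySem.List.slice
          (PySem.List.sorted (candsB fml asn sc asn.items) (fun x => x.2.1) false)
          (some (-bw)) none).find? (fun c => c.2.1 == (fml.length : Int)) with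
      | some sol =>
        have hmem : ((fml.length : Int) ∈ (PySem.List.slice
            (PySem.List.sorted (candsB fml asn sc asn.items) (fun x => x.2.1) false)
            (some (-bw)) none).map (fun c => c.2.1)) := by
          rw [mem_map_iff_find?, hf]; rfl
        simp only [if_pos hmem]
      | none =>
        have hmem : ¬ ((fml.length : Int) ∈ (PySem.List.slice
            (PySem.List.sorted (candsB fml asn sc asn.items) (fun x => x.2.1) false)
            (some (-bw)) none).map (fun c => c.2.1)) := by
          rw [mem_map_iff_find?, hf]; simp
        simp only [if_neg hmem]
        exact ih _ _

-- ===== VERDICT (by name: the statement is the Claim_ definition above) =====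
theorem bsrch_spec : Claim_equal_bsrch := by
  intro fml asn bw sc _ _
  show bsrch fml asn bw sc = bsrch_alt fml asn bw sc
  rw [bsrch, bsrch_alt]
  exact bsrchA_eq_loopB _ _ _ _ _
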